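-- pv_equiv track=rewrite | github.com/SeifMejri21/WSB | mention_count.py | sentiment_count
-- ===== SOURCE A (Python) =====
-- def sentiment_count(scores):
--     pos_count=0
--     neg_count=0
--     neut_count=0
--
--     for score in scores :
--         if(score>0):
--             pos_count=pos_count+1
--         elif(score<0):
--             neg_count=neg_count+1
--         else:
--             neut_count = neut_count+1
--     test_count = pos_count + neg_count + neut_count
--     if((test_count != len(scores))):
--         raise TypeError('you have a huge problem !!! ')
--     scores_list = [pos_count , neg_count , neut_count]
--     return(scores_list)
-- ===== SOURCE B (Python) =====
-- def sentiment_count(scores):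
--     pos_count = sum(1 for s in scores if s > 0)
--     neg_count = sum(1 for s in scores if s < 0)
--     neut_count = sum(1 for s in scores if not s > 0 and not s < 0)
--     return [pos_count, neg_count, neut_count]
-- ===== Notes on version B (the rewrite author's own statement) =====
-- stated objective: simpler
-- what changed: Replaces the single stateful loop over three counters with three independent filtered-count passes and drops the internal consistency check, which is provably never triggered for a list of ints.
import Mathlib
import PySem

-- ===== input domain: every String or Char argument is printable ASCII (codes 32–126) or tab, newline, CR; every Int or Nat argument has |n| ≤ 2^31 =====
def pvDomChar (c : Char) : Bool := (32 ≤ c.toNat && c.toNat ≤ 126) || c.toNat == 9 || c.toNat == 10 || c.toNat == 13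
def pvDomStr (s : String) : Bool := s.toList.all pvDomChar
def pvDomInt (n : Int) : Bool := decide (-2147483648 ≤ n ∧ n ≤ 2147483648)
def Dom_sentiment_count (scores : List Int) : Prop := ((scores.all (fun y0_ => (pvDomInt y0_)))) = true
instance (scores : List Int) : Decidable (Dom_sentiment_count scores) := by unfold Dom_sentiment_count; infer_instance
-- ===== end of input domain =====

-- B replaces A's single stateful three-counter loop with three independent filtered counts;
-- objective: simpler (A's consistency-check raise is provably unreachable for a list of ints).


-- ===== PORT A =====
-- literal transliteration of A's loop over (pos_count, neg_count, neut_count);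
-- the 'raise TypeError' branch (mapped to []) is provably unreachable for a list of ints.
def sentiment_count (scores : List Int) : List Int :=
  let st := scores.foldl
    (fun (st : Int × Int × Int) score =>
      if score > 0 then (st.1 + 1, st.2.1, st.2.2)
      else if score < 0 then (st.1, st.2.1 + 1, st.2.2)
      else (st.1, st.2.1, st.2.2 + 1))
    (0, 0, 0)
  let test_count := st.1 + st.2.1 + st.2.2
  if test_count ≠ (scores.length : Int) then []  -- raise TypeError: never taken
  else [st.1, st.2.1, st.2.2]

-- ===== PORT B =====
def sentiment_count_alt (scores : List Int) : List Int :=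
  [ (scores.countP (fun s => 0 < s) : Int)
  , (scores.countP (fun s => s < 0) : Int)
  , (scores.countP (fun s => !(0 < s) && !(s < 0)) : Int) ]

-- ===== PRECONDITION & SPEC =====
def Spec_sentiment_count (scores : List Int) (out : List Int) : Prop := out = sentiment_count_alt scores
instance (scores : List Int) (out : List Int) : Decidable (Spec_sentiment_count scores out) := by unfold Spec_sentiment_count; infer_instance

-- ===== CLAIM (what is proved, stated in full; the proofs are below) =====
def Claim_equal_sentiment_count : Prop := ∀ (scores : List Int), Dom_sentiment_count scores → Spec_sentiment_count scores (sentiment_count scores)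

-- ===== LEMMAS AND PROOFS =====
theorem sc_foldl_inv (scores : List Int) (p n z : Int) :
    scores.foldl
      (fun (st : Int × Int × Int) score =>
        if score > 0 then (st.1 + 1, st.2.1, st.2.2)
        else if score < 0 then (st.1, st.2.1 + 1, st.2.2)
        else (st.1, st.2.1, st.2.2 + 1))
      (p, n, z)
    = (p + (scores.countP (fun s => 0 < s) : Int),
       n + (scores.countP (fun s => s < 0) : Int),
       z + (scores.countP (fun s => !(0 < s) && !(s < 0)) : Int)) := by
  induction scores generalizing p n z with
  | nil => simp
  | cons x xs ih =>
    by_cases h1 : 0 < x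
    · simp [List.foldl_cons, h1, List.countP_cons, ih]
      refine ⟨by ring, by simp [h1.le]⟩
    · by_cases h2 : x < 0
      · simp [List.foldl_cons, h1, h2, ih]; ring
      · simp [List.foldl_cons, h1, h2, ih]; ring

theorem sc_count_total (scores : List Int) :
    (scores.countP (fun s => 0 < s) : Int)
      + (scores.countP (fun s => s < 0) : Int)
      + (scores.countP (fun s => !(0 < s) && !(s < 0)) : Int)
    = (scores.length : Int) := by
  induction scores with
  | nil => simp
  | cons x xs ih =>
    by_cases h1 : 0 < x
    · simp [List.countP_cons, h1]
      omega
    · by_cases h2 : x < 0 <;> simp [List.countP_cons, h1, h2] <;> omega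

-- ===== VERDICT (by name: the statement is the Claim_ definition above) =====
theorem sentiment_count_spec : Claim_equal_sentiment_count := by
  intro scores _
  unfold Spec_sentiment_count sentiment_count sentiment_count_alt
  simp only [sc_foldl_inv, zero_add]
  rw [if_neg]
  simp [sc_count_total scores]
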